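-- pv_equiv track=rewrite | github.com/jutaipal/autoseed | autoseed_v2.2.py | generate_sequence_value
-- ===== SOURCE A (Python) =====
-- dnaforward = "ACGTN"
--
-- def generate_sequence_value(searchstring):
--     """Convert DNA sequence to numerical representation"""
--     query_sequence_length = len(searchstring)
--     query_sequence_value = 0
--     position_value = 4 ** (query_sequence_length - 1)
--
--     for position in range(query_sequence_length):
--         nucleotide_value = 0
--         for nuc_idx in range(4):
--             if searchstring[position] == dnaforward[nuc_idx]:
--                 nucleotide_value = nuc_idx
--                 break
--         else:
--             raise ValueError(f"Invalid nucleotide in sequence: {searchstring[position]}")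
--
--         query_sequence_value += position_value * nucleotide_value
--         position_value //= 4
--
--     return query_sequence_value
-- ===== SOURCE B (Python) =====
-- _TO_BASE4 = str.maketrans("ACGT", "0123")
--
-- def generate_sequence_value(searchstring):
--     """Convert DNA sequence to numerical representation"""
--     if not searchstring:
--         return 0
--     return int(searchstring.translate(_TO_BASE4), 4)
-- ===== Notes on version B (the rewrite author's own statement) =====
-- stated objective: idiomatic
-- what changed: Replaces A's explicit positional loop (precomputed 4**(n-1) weight, per-step floor division, inner scan over the nucleotide alphabet) with two library passes: str.translate maps ACGT to the digit string over 0123, which int(s, 4) then parses as a base-4 literal; the empty string short-circuits to 0.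
import Mathlib
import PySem

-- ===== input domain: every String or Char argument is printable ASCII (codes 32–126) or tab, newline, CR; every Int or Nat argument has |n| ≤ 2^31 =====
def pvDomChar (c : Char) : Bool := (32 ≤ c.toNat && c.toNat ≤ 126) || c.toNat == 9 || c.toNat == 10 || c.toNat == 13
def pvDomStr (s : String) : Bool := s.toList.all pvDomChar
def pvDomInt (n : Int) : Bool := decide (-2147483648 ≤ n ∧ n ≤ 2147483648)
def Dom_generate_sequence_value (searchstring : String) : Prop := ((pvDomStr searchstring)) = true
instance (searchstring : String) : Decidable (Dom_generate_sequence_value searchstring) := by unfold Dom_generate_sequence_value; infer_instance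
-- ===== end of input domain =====

-- B replaces A's explicit positional loop (precomputed 4^(n-1) weight, per-step floor division,
-- inner scan over "ACGT") with two library passes: str.translate to a base-4 digit string, then
-- int(s, 4); objective: idiomatic.

-- ===== PORT A =====
-- inner 'for nuc_idx in range(4)' scan over dnaforward = "ACGTN"; the for-else raise branch is
-- excluded by Pre_ (the value 0 there is never reached inside Pre_)
def pvNucVal (c : Char) : Int :=
  if c = 'A' then 0
  else if c = 'C' then 1
  else if c = 'G' then 2
  else if c = 'T' then 3
  else 0

-- the 'for position in range(...)' loop: state (position_value, query_sequence_value)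
def pvALoop : List Char → Int → Int → Int
  | [], _, acc => acc
  | c :: cs, pv, acc => pvALoop cs (PySem.Int.floordiv pv 4) (acc + pv * pvNucVal c)

-- for the empty string Python's 4 ** (-1) is an unused float 0.25; here the unused start weight is
-- 4 ^ 0 — the loop never reads it, so the return value 0 is the same
def generate_sequence_value (searchstring : String) : Int :=
  pvALoop searchstring.toList ((4 : Int) ^ (searchstring.toList.length - 1)) 0

-- ===== PORT B =====
-- str.maketrans("ACGT", "0123") applied per character; other characters pass through unchanged
def pvTr (c : Char) : Char :=
  if c = 'A' then '0'
  else if c = 'C' then '1'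
  else if c = 'G' then '2'
  else if c = 'T' then '3'
  else c

def pvDigit4? (c : Char) : Option Int :=
  if c = '0' then some 0
  else if c = '1' then some 1
  else if c = '2' then some 2
  else if c = '3' then some 3
  else none

def pvWsChar (c : Char) : Bool :=
  c = ' ' || c = '\t' || c = '\n' || c = '\x0d' || c = '\x0b' || c = '\x0c'

-- after the first digit: each later char is a digit or a single '_' followed by a digit
def pvDigitsU : List Char → Int → Option Int
  | [], acc => some acc
  | '_' :: c :: rest, acc => (pvDigit4? c).bind fun d => pvDigitsU rest (acc * 4 + d)
  | '_' :: [], _ => none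
  | c :: rest, acc => (pvDigit4? c).bind fun d => pvDigitsU rest (acc * 4 + d)

-- int(s, 4): strip whitespace, optional sign, a digit, then digits with single underscores
-- between digits. Exact wherever Python's int(s, 4) returns; where Python raises ValueError this
-- returns 0 — every such input is excluded by Pre_ (A raises there too).
def pvIntBase4 (cs : List Char) : Int :=
  let t := ((cs.dropWhile pvWsChar).reverse.dropWhile pvWsChar).reverse
  let sd : Int × List Char :=
    match t with
    | '+' :: r => (1, r)
    | '-' :: r => (-1, r)
    | r => (1, r)
  match sd.2 with
  | [] => 0
  | c :: rest =>
    match (pvDigit4? c).bind (fun d => pvDigitsU rest d) with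
    | some v => sd.1 * v
    | none => 0

def generate_sequence_value_alt (searchstring : String) : Int :=
  if searchstring.toList = [] then 0
  else pvIntBase4 (searchstring.toList.map pvTr)

-- ===== PRECONDITION & SPEC =====
-- exactly the inputs on which Python A returns: every character is one of A/C/G/T
-- (on any other character A raises ValueError)
def Pre_generate_sequence_value (searchstring : String) : Prop :=
  searchstring.toList.all (fun c => c == 'A' || c == 'C' || c == 'G' || c == 'T') = true
instance (searchstring : String) : Decidable (Pre_generate_sequence_value searchstring) := by
  unfold Pre_generate_sequence_value; infer_instance

def pvWitness_generate_sequence_value : String := "ACGT"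

def Spec_generate_sequence_value (searchstring : String) (out : Int) : Prop :=
  out = generate_sequence_value_alt searchstring
instance (searchstring : String) (out : Int) : Decidable (Spec_generate_sequence_value searchstring out) := by
  unfold Spec_generate_sequence_value; infer_instance

-- ===== CLAIM (what is proved, stated in full; the proofs are below) =====
def Claim_equal_generate_sequence_value : Prop := ∀ (searchstring : String), Dom_generate_sequence_value searchstring → Pre_generate_sequence_value searchstring → Spec_generate_sequence_value searchstring (generate_sequence_value searchstring)

-- ===== LEMMAS AND PROOFS =====

def pvACGT (c : Char) : Prop := c = 'A' ∨ c = 'C' ∨ c = 'G' ∨ c = 'T'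

theorem pvPre_mem {s : String} (h : Pre_generate_sequence_value s) :
    ∀ c ∈ s.toList, pvACGT c := by
  intro c hc
  have := List.all_eq_true.mp h c hc
  simp only [Bool.or_eq_true, beq_iff_eq] at this
  tauto

-- translated characters are never whitespace
theorem pvTr_not_ws {c : Char} (h : pvACGT c) : pvWsChar (pvTr c) = false := by
  rcases h with h | h | h | h <;> subst h <;> decide

-- dropWhile leaves a list of non-whitespace characters unchanged
theorem pvDropWhile_id {l : List Char} (h : ∀ c ∈ l, pvWsChar c = false) :
    l.dropWhile pvWsChar = l := by
  cases l with
  | nil => rfl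
  | cons c cs => exact List.dropWhile_cons_of_neg (by simp [h c (by simp)])

-- the underscore-aware digit loop over all-digit lists computes Horner's value
theorem pvFold_digits (cs : List Char) (h : ∀ c ∈ cs, pvACGT c) : ∀ v : Int,
    pvDigitsU (cs.map pvTr) v = some (cs.foldl (fun v c => v * 4 + pvNucVal c) v) := by
  induction cs with
  | nil => intro v; rfl
  | cons c cs ih =>
      intro v
      have hc := h c (by simp)
      have ih' := ih (fun d hd => h d (by simp [hd]))
      rcases hc with h1 | h1 | h1 | h1 <;> subst h1 <;>
        simp [pvTr, pvDigit4?, pvDigitsU, pvNucVal, ih']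

-- Horner's fold shifts: running it from v multiplies v by 4^len
theorem pvHorner_shift (cs : List Char) : ∀ v : Int,
    cs.foldl (fun v c => v * 4 + pvNucVal c) v
      = v * 4 ^ cs.length + cs.foldl (fun v c => v * 4 + pvNucVal c) 0 := by
  induction cs with
  | nil => intro v; simp
  | cons c cs ih =>
      intro v
      simp only [List.foldl_cons, List.length_cons]
      rw [ih (v * 4 + pvNucVal c), ih (0 * 4 + pvNucVal c)]
      ring

-- A's loop started at weight 4^(len-1) computes the Horner value
theorem pvALoop_eq (cs : List Char) : ∀ acc : Int,
    pvALoop cs ((4 : Int) ^ (cs.length - 1)) acc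
      = acc + cs.foldl (fun v c => v * 4 + pvNucVal c) 0 := by
  induction cs with
  | nil => intro acc; simp [pvALoop]
  | cons c cs ih =>
      intro acc
      simp only [pvALoop, List.length_cons, Nat.add_sub_cancel, List.foldl_cons]
      cases cs with
      | nil => simp [pvALoop]
      | cons c' cs' =>
          have hdiv : PySem.Int.floordiv ((4 : Int) ^ (c' :: cs').length) 4
              = (4 : Int) ^ ((c' :: cs').length - 1) := by
            rw [PySem.Int.floordiv_eq_ediv_of_pos (by norm_num)]
            simp only [List.length_cons, Nat.add_sub_cancel]
            rw [pow_succ]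
            exact Int.mul_ediv_cancel _ (by norm_num)
          rw [hdiv, ih]
          rw [pvHorner_shift (c' :: cs') (0 * 4 + pvNucVal c)]
          ring

-- on a nonempty all-ACGT string, B's translate + int(s, 4) is the Horner value
theorem pvB_eq (c : Char) (cs : List Char) (h : ∀ d ∈ c :: cs, pvACGT d) :
    pvIntBase4 ((c :: cs).map pvTr) = (c :: cs).foldl (fun v d => v * 4 + pvNucVal d) 0 := by
  have hnw : ∀ d ∈ (c :: cs).map pvTr, pvWsChar d = false := by
    intro d hd
    rcases List.mem_map.mp hd with ⟨e, he, rfl⟩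
    exact pvTr_not_ws (h e he)
  have hnw' : ∀ d ∈ ((c :: cs).map pvTr).reverse, pvWsChar d = false := by
    intro d hd; exact hnw d (List.mem_reverse.mp hd)
  unfold pvIntBase4
  rw [pvDropWhile_id hnw, pvDropWhile_id hnw', List.reverse_reverse]
  have hc := h c (by simp)
  have hsgn : pvTr c ≠ '+' ∧ pvTr c ≠ '-' := by
    rcases hc with h1 | h1 | h1 | h1 <;> subst h1 <;> exact ⟨by decide, by decide⟩
  simp only [List.map_cons]
  have hmatch :
      (match pvTr c :: cs.map pvTr with
        | '+' :: r => ((1 : Int), r)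
        | '-' :: r => ((-1 : Int), r)
        | r => ((1 : Int), r)) = (1, pvTr c :: cs.map pvTr) := by
    rcases hc with h1 | h1 | h1 | h1 <;> subst h1 <;> rfl
  rw [hmatch]
  have hrest := pvFold_digits cs (fun d hd => h d (by simp [hd]))
  rcases hc with h1 | h1 | h1 | h1 <;> subst h1 <;>
    simp [pvTr, pvDigit4?, pvNucVal, hrest]

-- ===== VERDICT (by name: the statement is the Claim_ definition above) =====
theorem generate_sequence_value_spec : Claim_equal_generate_sequence_value := by
  intro s _ hpre
  show generate_sequence_value s = generate_sequence_value_alt s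
  unfold generate_sequence_value generate_sequence_value_alt
  cases hs : s.toList with
  | nil => simp [pvALoop]
  | cons c cs =>
      have hmem : ∀ d ∈ c :: cs, pvACGT d := by
        intro d hd; exact pvPre_mem hpre d (hs ▸ hd)
      rw [if_neg (List.cons_ne_nil c cs)]
      rw [pvALoop_eq, pvB_eq c cs hmem]
      simp
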